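-- pv_equiv track=rewrite | github.com/micki79/mining | GPUMiner_GUI/multi_gpu_profit.py | match_gpu_model
-- ===== SOURCE A (Python) =====
-- def match_gpu_model(gpu_name: str) -> str:
--     """
--     Matched GPU-Namen zu bekanntem Modell
--
--     Args:
--         gpu_name: Voller GPU Name (z.B. "NVIDIA GeForce RTX 3080 Laptop GPU")
--
--     Returns:
--         Erkanntes Modell (z.B. "RTX 3080 Laptop") oder "Unknown"
--     """
--     gpu_upper = gpu_name.upper()
--
--     # Laptop-Erkennung (muss vor Desktop kommen!)
--     laptop_keywords = ["LAPTOP", "MOBILE", "MAX-Q", "MAX Q"]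
--     is_laptop = any(kw in gpu_upper for kw in laptop_keywords)
--
--     # RTX 40 Series
--     if "4090" in gpu_upper:
--         return "RTX 4090"
--     if "4080" in gpu_upper:
--         return "RTX 4080"
--     if "4070 TI" in gpu_upper or "4070TI" in gpu_upper:
--         return "RTX 4070 Ti"
--     if "4070" in gpu_upper:
--         return "RTX 4070"
--     if "4060 TI" in gpu_upper or "4060TI" in gpu_upper:
--         return "RTX 4060 Ti"
--     if "4060" in gpu_upper:
--         return "RTX 4060"
--
--     # RTX 30 Series
--     if "3090 TI" in gpu_upper or "3090TI" in gpu_upper: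
--         return "RTX 3090 Ti"
--     if "3090" in gpu_upper:
--         return "RTX 3090"
--     if "3080 TI" in gpu_upper or "3080TI" in gpu_upper:
--         return "RTX 3080 Ti"
--     if "3080" in gpu_upper:
--         return "RTX 3080 Laptop" if is_laptop else "RTX 3080"
--     if "3070 TI" in gpu_upper or "3070TI" in gpu_upper:
--         return "RTX 3070 Ti"
--     if "3070" in gpu_upper:
--         return "RTX 3070 Laptop" if is_laptop else "RTX 3070"
--     if "3060 TI" in gpu_upper or "3060TI" in gpu_upper:
--         return "RTX 3060 Ti"
--     if "3060" in gpu_upper: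
--         return "RTX 3060 Laptop" if is_laptop else "RTX 3060"
--
--     # RTX 20 Series
--     if "2080 TI" in gpu_upper or "2080TI" in gpu_upper:
--         return "RTX 2080 Ti"
--     if "2080 SUPER" in gpu_upper:
--         return "RTX 2080 Super"
--     if "2080" in gpu_upper:
--         return "RTX 2080"
--     if "2070 SUPER" in gpu_upper:
--         return "RTX 2070 Super"
--     if "2070" in gpu_upper:
--         return "RTX 2070"
--     if "2060 SUPER" in gpu_upper:
--         return "RTX 2060 Super"
--     if "2060" in gpu_upper:
--         return "RTX 2060"
--
--     # GTX 16 Series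
--     if "1660 TI" in gpu_upper or "1660TI" in gpu_upper:
--         return "GTX 1660 Ti"
--     if "1660 SUPER" in gpu_upper:
--         return "GTX 1660 Super"
--     if "1660" in gpu_upper:
--         return "GTX 1660"
--
--     # AMD RX 7000
--     if "7900 XTX" in gpu_upper:
--         return "RX 7900 XTX"
--     if "7900 XT" in gpu_upper:
--         return "RX 7900 XT"
--
--     # AMD RX 6000
--     if "6950 XT" in gpu_upper:
--         return "RX 6950 XT"
--     if "6900 XT" in gpu_upper:
--         return "RX 6900 XT"
--     if "6800 XT" in gpu_upper:
--         return "RX 6800 XT"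
--     if "6800" in gpu_upper:
--         return "RX 6800"
--     if "6700 XT" in gpu_upper:
--         return "RX 6700 XT"
--     if "6600 XT" in gpu_upper:
--         return "RX 6600 XT"
--     if "6600" in gpu_upper:
--         return "RX 6600"
--
--     return "Unknown"
-- ===== SOURCE B (Python) =====
-- # Single left-to-right token scan: collect (model,variant) keys at each digit position, then resolve by a priority table.
-- _MODELS = ("4090", "4080", "4070", "4060", "3090", "3080", "3070", "3060",
--            "2080", "2070", "2060", "1660", "7900", "6950", "6900", "6800", "6700", "6600")
--
-- _PRIORITY = [
--     ("4090", "RTX 4090", None),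
--     ("4080", "RTX 4080", None),
--     ("4070+TI", "RTX 4070 Ti", None),
--     ("4070", "RTX 4070", None),
--     ("4060+TI", "RTX 4060 Ti", None),
--     ("4060", "RTX 4060", None),
--     ("3090+TI", "RTX 3090 Ti", None),
--     ("3090", "RTX 3090", None),
--     ("3080+TI", "RTX 3080 Ti", None),
--     ("3080", "RTX 3080", "RTX 3080 Laptop"),
--     ("3070+TI", "RTX 3070 Ti", None),
--     ("3070", "RTX 3070", "RTX 3070 Laptop"),
--     ("3060+TI", "RTX 3060 Ti", None),
--     ("3060", "RTX 3060", "RTX 3060 Laptop"),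
--     ("2080+TI", "RTX 2080 Ti", None),
--     ("2080+SUPER", "RTX 2080 Super", None),
--     ("2080", "RTX 2080", None),
--     ("2070+SUPER", "RTX 2070 Super", None),
--     ("2070", "RTX 2070", None),
--     ("2060+SUPER", "RTX 2060 Super", None),
--     ("2060", "RTX 2060", None),
--     ("1660+TI", "GTX 1660 Ti", None),
--     ("1660+SUPER", "GTX 1660 Super", None),
--     ("1660", "GTX 1660", None),
--     ("7900+XTX", "RX 7900 XTX", None),
--     ("7900+XT", "RX 7900 XT", None),
--     ("6950+XT", "RX 6950 XT", None),
--     ("6900+XT", "RX 6900 XT", None),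
--     ("6800+XT", "RX 6800 XT", None),
--     ("6800", "RX 6800", None),
--     ("6700+XT", "RX 6700 XT", None),
--     ("6600+XT", "RX 6600 XT", None),
--     ("6600", "RX 6600", None),
-- ]
--
--
-- def _keys_at(u: str, i: int) -> list:
--     m = u[i:i + 4]
--     if m not in _MODELS:
--         return []
--     keys = [m]
--     rest = u[i + 4:]
--     if rest.startswith("TI") or rest.startswith(" TI"):
--         keys.append(m + "+TI")
--     if rest.startswith(" SUPER"):
--         keys.append(m + "+SUPER")
--     if rest.startswith(" XTX"):
--         keys.append(m + "+XTX")
--     if rest.startswith(" XT"):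
--         keys.append(m + "+XT")
--     return keys
--
--
-- def match_gpu_model(gpu_name: str) -> str:
--     gpu_upper = gpu_name.upper()
--     matched = [k for i in range(len(gpu_upper)) for k in _keys_at(gpu_upper, i)]
--     is_laptop = any(kw in gpu_upper for kw in ("LAPTOP", "MOBILE", "MAX-Q", "MAX Q"))
--     for key, desktop, laptop in _PRIORITY:
--         if key in matched:
--             return laptop if (is_laptop and laptop is not None) else desktop
--     return "Unknown"
-- ===== Notes on version B (the rewrite author's own statement) =====
-- stated objective: alternative
-- what changed: Replaced A's 33 independent substring tests by a single left-to-right scan that collects (model, variant) tokens at each string position, followed by a lookup in a priority table that resolves the collected tokens (with the laptop override) to the model name.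
import Mathlib
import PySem

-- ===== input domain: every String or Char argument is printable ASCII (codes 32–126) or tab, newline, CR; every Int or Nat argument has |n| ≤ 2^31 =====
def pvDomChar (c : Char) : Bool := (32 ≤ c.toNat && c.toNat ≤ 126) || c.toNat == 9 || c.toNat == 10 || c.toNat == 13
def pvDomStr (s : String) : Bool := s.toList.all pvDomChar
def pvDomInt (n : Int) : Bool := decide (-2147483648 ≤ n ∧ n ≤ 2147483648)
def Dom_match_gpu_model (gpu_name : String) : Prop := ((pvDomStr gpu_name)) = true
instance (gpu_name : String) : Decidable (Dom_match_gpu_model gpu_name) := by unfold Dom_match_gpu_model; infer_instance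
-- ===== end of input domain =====

-- B replaces A's 33 independent substring tests by ONE left-to-right scan of the string that collects
-- (model, variant) keys at each position, followed by a priority-table lookup (objective: alternative).


-- ===== PORT A =====
def match_gpu_model (gpu_name : String) : String :=
  let gpu_upper := PySem.Str.upper gpu_name
  let laptop_keywords : List String := ["LAPTOP", "MOBILE", "MAX-Q", "MAX Q"]
  let is_laptop := laptop_keywords.any (fun kw => PySem.Str.isIn kw gpu_upper)
  if PySem.Str.isIn "4090" gpu_upper then "RTX 4090"
  else if PySem.Str.isIn "4080" gpu_upper then "RTX 4080"
  else if PySem.Str.isIn "4070 TI" gpu_upper then "RTX 4070 Ti"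
  else if PySem.Str.isIn "4070TI" gpu_upper then "RTX 4070 Ti"
  else if PySem.Str.isIn "4070" gpu_upper then "RTX 4070"
  else if PySem.Str.isIn "4060 TI" gpu_upper then "RTX 4060 Ti"
  else if PySem.Str.isIn "4060TI" gpu_upper then "RTX 4060 Ti"
  else if PySem.Str.isIn "4060" gpu_upper then "RTX 4060"
  else if PySem.Str.isIn "3090 TI" gpu_upper then "RTX 3090 Ti"
  else if PySem.Str.isIn "3090TI" gpu_upper then "RTX 3090 Ti"
  else if PySem.Str.isIn "3090" gpu_upper then "RTX 3090"
  else if PySem.Str.isIn "3080 TI" gpu_upper then "RTX 3080 Ti"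
  else if PySem.Str.isIn "3080TI" gpu_upper then "RTX 3080 Ti"
  else if PySem.Str.isIn "3080" gpu_upper then (if is_laptop then "RTX 3080 Laptop" else "RTX 3080")
  else if PySem.Str.isIn "3070 TI" gpu_upper then "RTX 3070 Ti"
  else if PySem.Str.isIn "3070TI" gpu_upper then "RTX 3070 Ti"
  else if PySem.Str.isIn "3070" gpu_upper then (if is_laptop then "RTX 3070 Laptop" else "RTX 3070")
  else if PySem.Str.isIn "3060 TI" gpu_upper then "RTX 3060 Ti"
  else if PySem.Str.isIn "3060TI" gpu_upper then "RTX 3060 Ti"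
  else if PySem.Str.isIn "3060" gpu_upper then (if is_laptop then "RTX 3060 Laptop" else "RTX 3060")
  else if PySem.Str.isIn "2080 TI" gpu_upper then "RTX 2080 Ti"
  else if PySem.Str.isIn "2080TI" gpu_upper then "RTX 2080 Ti"
  else if PySem.Str.isIn "2080 SUPER" gpu_upper then "RTX 2080 Super"
  else if PySem.Str.isIn "2080" gpu_upper then "RTX 2080"
  else if PySem.Str.isIn "2070 SUPER" gpu_upper then "RTX 2070 Super"
  else if PySem.Str.isIn "2070" gpu_upper then "RTX 2070"
  else if PySem.Str.isIn "2060 SUPER" gpu_upper then "RTX 2060 Super"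
  else if PySem.Str.isIn "2060" gpu_upper then "RTX 2060"
  else if PySem.Str.isIn "1660 TI" gpu_upper then "GTX 1660 Ti"
  else if PySem.Str.isIn "1660TI" gpu_upper then "GTX 1660 Ti"
  else if PySem.Str.isIn "1660 SUPER" gpu_upper then "GTX 1660 Super"
  else if PySem.Str.isIn "1660" gpu_upper then "GTX 1660"
  else if PySem.Str.isIn "7900 XTX" gpu_upper then "RX 7900 XTX"
  else if PySem.Str.isIn "7900 XT" gpu_upper then "RX 7900 XT"
  else if PySem.Str.isIn "6950 XT" gpu_upper then "RX 6950 XT"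
  else if PySem.Str.isIn "6900 XT" gpu_upper then "RX 6900 XT"
  else if PySem.Str.isIn "6800 XT" gpu_upper then "RX 6800 XT"
  else if PySem.Str.isIn "6800" gpu_upper then "RX 6800"
  else if PySem.Str.isIn "6700 XT" gpu_upper then "RX 6700 XT"
  else if PySem.Str.isIn "6600 XT" gpu_upper then "RX 6600 XT"
  else if PySem.Str.isIn "6600" gpu_upper then "RX 6600"
  else "Unknown"

-- ===== PORT B =====
-- the 18 four-digit model tokens the scanner recognises
def pvModels : List (List Char) :=
  ["4090".toList, "4080".toList, "4070".toList, "4060".toList, "3090".toList, "3080".toList, "3070".toList, "3060".toList, "2080".toList, "2070".toList, "2060".toList, "1660".toList, "7900".toList, "6950".toList, "6900".toList, "6800".toList, "6700".toList, "6600".toList]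

-- Source B's _keys_at: the keys contributed at position i of u
def pvKeysAt (u : List Char) (i : Nat) : List String :=
  let m := PySem.List.slice u (some (i : Int)) (some ((i : Int) + 4))
  if m ∈ pvModels then
    let rest := PySem.List.slice u (some ((i : Int) + 4)) none
    [String.ofList m]
      ++ (if PySem.Chars.startswith rest "TI".toList || PySem.Chars.startswith rest " TI".toList
          then [String.ofList m ++ "+TI"] else [])
      ++ (if PySem.Chars.startswith rest " SUPER".toList then [String.ofList m ++ "+SUPER"] else [])
      ++ (if PySem.Chars.startswith rest " XTX".toList then [String.ofList m ++ "+XTX"] else [])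
      ++ (if PySem.Chars.startswith rest " XT".toList then [String.ofList m ++ "+XT"] else [])
  else []

-- the comprehension [k for i in range(len(u)) for k in _keys_at(u, i)]
def pvMatched (u : List Char) : List String :=
  (List.range u.length).flatMap (fun i => pvKeysAt u i)

-- the priority table (key, desktop name, laptop name if any), in A's priority order
def pvPriority : List (String × String × Option String) :=
  [ ("4090", "RTX 4090", none),
    ("4080", "RTX 4080", none),
    ("4070+TI", "RTX 4070 Ti", none),
    ("4070", "RTX 4070", none),
    ("4060+TI", "RTX 4060 Ti", none),
    ("4060", "RTX 4060", none),
    ("3090+TI", "RTX 3090 Ti", none),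
    ("3090", "RTX 3090", none),
    ("3080+TI", "RTX 3080 Ti", none),
    ("3080", "RTX 3080", some "RTX 3080 Laptop"),
    ("3070+TI", "RTX 3070 Ti", none),
    ("3070", "RTX 3070", some "RTX 3070 Laptop"),
    ("3060+TI", "RTX 3060 Ti", none),
    ("3060", "RTX 3060", some "RTX 3060 Laptop"),
    ("2080+TI", "RTX 2080 Ti", none),
    ("2080+SUPER", "RTX 2080 Super", none),
    ("2080", "RTX 2080", none),
    ("2070+SUPER", "RTX 2070 Super", none),
    ("2070", "RTX 2070", none),
    ("2060+SUPER", "RTX 2060 Super", none),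
    ("2060", "RTX 2060", none),
    ("1660+TI", "GTX 1660 Ti", none),
    ("1660+SUPER", "GTX 1660 Super", none),
    ("1660", "GTX 1660", none),
    ("7900+XTX", "RX 7900 XTX", none),
    ("7900+XT", "RX 7900 XT", none),
    ("6950+XT", "RX 6950 XT", none),
    ("6900+XT", "RX 6900 XT", none),
    ("6800+XT", "RX 6800 XT", none),
    ("6800", "RX 6800", none),
    ("6700+XT", "RX 6700 XT", none),
    ("6600+XT", "RX 6600 XT", none),
    ("6600", "RX 6600", none) ]

def match_gpu_model_alt (gpu_name : String) : String :=
  let gpu_upper := PySem.Str.upper gpu_name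
  let matched := pvMatched gpu_upper.toList
  let is_laptop := (["LAPTOP", "MOBILE", "MAX-Q", "MAX Q"] : List String).any
    (fun kw => PySem.Str.isIn kw gpu_upper)
  match pvPriority.find? (fun r => matched.contains r.1) with
  | some r => match r.2.2 with
              | some lap => if is_laptop then lap else r.2.1
              | none => r.2.1
  | none => "Unknown"

-- ===== PRECONDITION & SPEC =====
def Spec_match_gpu_model (gpu_name : String) (out : String) : Prop := out = match_gpu_model_alt gpu_name
instance (gpu_name : String) (out : String) : Decidable (Spec_match_gpu_model gpu_name out) := by unfold Spec_match_gpu_model; infer_instance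

-- ===== CLAIM (what is proved, stated in full; the proofs are below) =====
def Claim_equal_match_gpu_model : Prop := ∀ (gpu_name : String), Dom_match_gpu_model gpu_name → Spec_match_gpu_model gpu_name (match_gpu_model gpu_name)

-- ===== LEMMAS AND PROOFS =====

-- prefixes split across a position: (p ++ q) starts at i iff p starts at i and q starts at i + |p|
theorem pv_prefix_split (u p q : List Char) (i : Nat) :
    (p ++ q) <+: u.drop i ↔ (p <+: u.drop i ∧ q <+: u.drop (i + p.length)) := by
  rw [show u.drop (i + p.length) = (u.drop i).drop p.length from by rw [List.drop_drop, Nat.add_comm]]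
  constructor
  · rintro ⟨t, ht⟩
    refine ⟨⟨q ++ t, by simpa using ht⟩, ?_⟩
    rw [← ht]; exact ⟨t, by simp⟩
  · rintro ⟨hp, ⟨t, ht⟩⟩
    refine ⟨t, ?_⟩
    have h1 : (u.drop i).take p.length = p := (List.prefix_iff_eq_take.mp hp).symm
    calc p ++ q ++ t = (u.drop i).take p.length ++ ((u.drop i).drop p.length) := by
          rw [h1, List.append_assoc, ht]
    _ = u.drop i := by simp
theorem pv_mem_keysAt (u : List Char) (i : Nat) (K : String) :
    K ∈ pvKeysAt u i ↔
      ((u.drop i).take 4 ∈ pvModels ∧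
        (K = String.ofList ((u.drop i).take 4)
         ∨ (("TI".toList <+: u.drop (i+4) ∨ " TI".toList <+: u.drop (i+4)) ∧ K = String.ofList ((u.drop i).take 4) ++ "+TI")
         ∨ (" SUPER".toList <+: u.drop (i+4) ∧ K = String.ofList ((u.drop i).take 4) ++ "+SUPER")
         ∨ (" XTX".toList <+: u.drop (i+4) ∧ K = String.ofList ((u.drop i).take 4) ++ "+XTX")
         ∨ (" XT".toList <+: u.drop (i+4) ∧ K = String.ofList ((u.drop i).take 4) ++ "+XT"))) := by
  have hs1 : PySem.List.slice u (some (i : Int)) (some ((i : Int) + 4)) = (u.drop i).take 4 := by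
    simpa using PySem.List.slice_natCast_add u i 4
  have hs2 : PySem.List.slice u (some ((i : Int) + 4)) none = u.drop (i + 4) := by
    simpa using PySem.List.slice_from_natCast u (i + 4)
  unfold pvKeysAt
  rw [hs1, hs2]
  dsimp only
  split_ifs <;> simp_all [Bool.or_eq_true, PySem.Chars.startswith_iff]


-- take 4 = p (|p| = 4) is the same as p being a prefix
theorem pv_take4 (l p : List Char) (hp : p.length = 4) :
    (l.take 4 = p) ↔ p <+: l := by
  constructor
  · intro h; rw [← h]; exact List.take_prefix _ _
  · intro h; rw [← hp]; exact (List.prefix_iff_eq_take.mp h).symm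

theorem pv_key_suffix (m : List Char) (v K : String) (h : K = String.ofList m ++ v) :
    v.toList <:+ K.toList := by
  rw [h]; exact ⟨m, by simp⟩

theorem pv_lt_of_prefix (u P : List Char) (j : Nat) (hne : P ≠ []) (h : P <+: u.drop j) :
    j < u.length := by
  by_contra hle
  rcases h with ⟨t, ht⟩
  rw [List.drop_eq_nil_iff.mpr (by omega)] at ht
  exact hne (List.append_eq_nil_iff.mp ht).1

theorem pv_contains_ti (s p K P1 P2 : String)
    (hp : p.toList.length = 4) (hm : p.toList ∈ pvModels)
    (hK : K = p ++ "+TI") (hP1 : P1 = p ++ " TI") (hP2 : P2 = p ++ "TI") :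
    (pvMatched s.toList).contains K = (PySem.Str.isIn P1 s || PySem.Str.isIn P2 s) := by
  rw [Bool.eq_iff_iff, List.contains_iff_mem, Bool.or_eq_true]
  simp only [PySem.Str.isIn_eq]
  rw [← PySem.Chars.exists_prefix_drop_iff_isIn, ← PySem.Chars.exists_prefix_drop_iff_isIn]
  simp only [pvMatched, List.mem_flatMap, List.mem_range]
  constructor
  · rintro ⟨i, hi, hk⟩
    rw [pv_mem_keysAt] at hk
    obtain ⟨hmem, hor⟩ := hk
    have hKsuf : "+TI".toList <:+ K.toList := by rw [hK]; exact ⟨p.toList, by simp⟩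
    rcases hor with h | ⟨hc, h⟩ | ⟨hc, h⟩ | ⟨hc, h⟩ | ⟨hc, h⟩
    · exfalso
      have hl : K.toList.length ≤ 4 := by rw [h]; simp
      have hl2 : K.toList.length = 7 := by rw [hK]; simp [hp]
      omega
    · have hm' : (s.toList.drop i).take 4 = p.toList := by
        have h2 := congrArg String.toList h
        simp [hK] at h2
        exact h2.symm
      have hpre : p.toList <+: s.toList.drop i := (pv_take4 _ _ hp).mp hm'
      rcases hc with hc | hc
      · right; refine ⟨i, ?_⟩
        rw [hP2]; simp only [String.toList_append]
        rw [pv_prefix_split, hp]; exact ⟨hpre, hc⟩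
      · left; refine ⟨i, ?_⟩
        rw [hP1]; simp only [String.toList_append]
        rw [pv_prefix_split, hp]; exact ⟨hpre, hc⟩
    · exact absurd (List.suffix_of_suffix_length_le hKsuf (pv_key_suffix _ _ _ h) (by decide)) (by decide)
    · exact absurd (List.suffix_of_suffix_length_le hKsuf (pv_key_suffix _ _ _ h) (by decide)) (by decide)
    · exact absurd (List.suffix_of_suffix_length_le (pv_key_suffix _ _ _ h) hKsuf (by decide)) (by decide)
  · rintro (⟨j, hj⟩ | ⟨j, hj⟩)
    · rw [hP1] at hj; simp only [String.toList_append] at hj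
      rw [pv_prefix_split, hp] at hj
      obtain ⟨hpre, hsuf⟩ := hj
      have htake : (s.toList.drop j).take 4 = p.toList := (pv_take4 _ _ hp).mpr hpre
      refine ⟨j, pv_lt_of_prefix _ _ _ (by intro hc; rw [hc] at hp; simp at hp) hpre, ?_⟩
      rw [pv_mem_keysAt, htake]
      exact ⟨hm, Or.inr (Or.inl ⟨Or.inr hsuf, by rw [hK]; simp⟩)⟩
    · rw [hP2] at hj; simp only [String.toList_append] at hj
      rw [pv_prefix_split, hp] at hj
      obtain ⟨hpre, hsuf⟩ := hj
      have htake : (s.toList.drop j).take 4 = p.toList := (pv_take4 _ _ hp).mpr hpre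
      refine ⟨j, pv_lt_of_prefix _ _ _ (by intro hc; rw [hc] at hp; simp at hp) hpre, ?_⟩
      rw [pv_mem_keysAt, htake]
      exact ⟨hm, Or.inr (Or.inl ⟨Or.inl hsuf, by rw [hK]; simp⟩)⟩

theorem pv_contains_super (s p K P : String)
    (hp : p.toList.length = 4) (hm : p.toList ∈ pvModels)
    (hK : K = p ++ "+SUPER") (hP : P = p ++ " SUPER") :
    (pvMatched s.toList).contains K = PySem.Str.isIn P s := by
  rw [Bool.eq_iff_iff, List.contains_iff_mem]
  simp only [PySem.Str.isIn_eq]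
  rw [← PySem.Chars.exists_prefix_drop_iff_isIn]
  simp only [pvMatched, List.mem_flatMap, List.mem_range]
  constructor
  · rintro ⟨i, hi, hk⟩
    rw [pv_mem_keysAt] at hk
    obtain ⟨hmem, hor⟩ := hk
    have hKsuf : "+SUPER".toList <:+ K.toList := by rw [hK]; exact ⟨p.toList, by simp⟩
    rcases hor with h | ⟨hc, h⟩ | ⟨hc, h⟩ | ⟨hc, h⟩ | ⟨hc, h⟩
    · exfalso
      have hl : K.toList.length ≤ 4 := by rw [h]; simp
      have hl2 : K.toList.length = 10 := by rw [hK]; simp [hp]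
      omega
    · exact absurd (List.suffix_of_suffix_length_le (pv_key_suffix _ _ _ h) hKsuf (by decide)) (by decide)
    · have hm' : (s.toList.drop i).take 4 = p.toList := by
        have h2 := congrArg String.toList h
        simp [hK] at h2
        exact h2.symm
      have hpre : p.toList <+: s.toList.drop i := (pv_take4 _ _ hp).mp hm'
      refine ⟨i, ?_⟩
      rw [hP]; simp only [String.toList_append]
      rw [pv_prefix_split, hp]; exact ⟨hpre, hc⟩
    · exact absurd (List.suffix_of_suffix_length_le (pv_key_suffix _ _ _ h) hKsuf (by decide)) (by decide)
    · exact absurd (List.suffix_of_suffix_length_le (pv_key_suffix _ _ _ h) hKsuf (by decide)) (by decide)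
  · rintro ⟨j, hj⟩
    rw [hP] at hj; simp only [String.toList_append] at hj
    rw [pv_prefix_split, hp] at hj
    obtain ⟨hpre, hsuf⟩ := hj
    have htake : (s.toList.drop j).take 4 = p.toList := (pv_take4 _ _ hp).mpr hpre
    refine ⟨j, pv_lt_of_prefix _ _ _ (by intro hc; rw [hc] at hp; simp at hp) hpre, ?_⟩
    rw [pv_mem_keysAt, htake]
    exact ⟨hm, Or.inr (Or.inr (Or.inl (⟨hsuf, by rw [hK]; simp⟩)))⟩

theorem pv_contains_xtx (s p K P : String)
    (hp : p.toList.length = 4) (hm : p.toList ∈ pvModels)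
    (hK : K = p ++ "+XTX") (hP : P = p ++ " XTX") :
    (pvMatched s.toList).contains K = PySem.Str.isIn P s := by
  rw [Bool.eq_iff_iff, List.contains_iff_mem]
  simp only [PySem.Str.isIn_eq]
  rw [← PySem.Chars.exists_prefix_drop_iff_isIn]
  simp only [pvMatched, List.mem_flatMap, List.mem_range]
  constructor
  · rintro ⟨i, hi, hk⟩
    rw [pv_mem_keysAt] at hk
    obtain ⟨hmem, hor⟩ := hk
    have hKsuf : "+XTX".toList <:+ K.toList := by rw [hK]; exact ⟨p.toList, by simp⟩
    rcases hor with h | ⟨hc, h⟩ | ⟨hc, h⟩ | ⟨hc, h⟩ | ⟨hc, h⟩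
    · exfalso
      have hl : K.toList.length ≤ 4 := by rw [h]; simp
      have hl2 : K.toList.length = 8 := by rw [hK]; simp [hp]
      omega
    · exact absurd (List.suffix_of_suffix_length_le (pv_key_suffix _ _ _ h) hKsuf (by decide)) (by decide)
    · exact absurd (List.suffix_of_suffix_length_le hKsuf (pv_key_suffix _ _ _ h) (by decide)) (by decide)
    · have hm' : (s.toList.drop i).take 4 = p.toList := by
        have h2 := congrArg String.toList h
        simp [hK] at h2
        exact h2.symm
      have hpre : p.toList <+: s.toList.drop i := (pv_take4 _ _ hp).mp hm'
      refine ⟨i, ?_⟩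
      rw [hP]; simp only [String.toList_append]
      rw [pv_prefix_split, hp]; exact ⟨hpre, hc⟩
    · exact absurd (List.suffix_of_suffix_length_le (pv_key_suffix _ _ _ h) hKsuf (by decide)) (by decide)
  · rintro ⟨j, hj⟩
    rw [hP] at hj; simp only [String.toList_append] at hj
    rw [pv_prefix_split, hp] at hj
    obtain ⟨hpre, hsuf⟩ := hj
    have htake : (s.toList.drop j).take 4 = p.toList := (pv_take4 _ _ hp).mpr hpre
    refine ⟨j, pv_lt_of_prefix _ _ _ (by intro hc; rw [hc] at hp; simp at hp) hpre, ?_⟩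
    rw [pv_mem_keysAt, htake]
    exact ⟨hm, Or.inr (Or.inr (Or.inr (Or.inl (⟨hsuf, by rw [hK]; simp⟩))))⟩

theorem pv_contains_xt (s p K P : String)
    (hp : p.toList.length = 4) (hm : p.toList ∈ pvModels)
    (hK : K = p ++ "+XT") (hP : P = p ++ " XT") :
    (pvMatched s.toList).contains K = PySem.Str.isIn P s := by
  rw [Bool.eq_iff_iff, List.contains_iff_mem]
  simp only [PySem.Str.isIn_eq]
  rw [← PySem.Chars.exists_prefix_drop_iff_isIn]
  simp only [pvMatched, List.mem_flatMap, List.mem_range]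
  constructor
  · rintro ⟨i, hi, hk⟩
    rw [pv_mem_keysAt] at hk
    obtain ⟨hmem, hor⟩ := hk
    have hKsuf : "+XT".toList <:+ K.toList := by rw [hK]; exact ⟨p.toList, by simp⟩
    rcases hor with h | ⟨hc, h⟩ | ⟨hc, h⟩ | ⟨hc, h⟩ | ⟨hc, h⟩
    · exfalso
      have hl : K.toList.length ≤ 4 := by rw [h]; simp
      have hl2 : K.toList.length = 7 := by rw [hK]; simp [hp]
      omega
    · exact absurd (List.suffix_of_suffix_length_le (pv_key_suffix _ _ _ h) hKsuf (by decide)) (by decide)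
    · exact absurd (List.suffix_of_suffix_length_le hKsuf (pv_key_suffix _ _ _ h) (by decide)) (by decide)
    · exact absurd (List.suffix_of_suffix_length_le hKsuf (pv_key_suffix _ _ _ h) (by decide)) (by decide)
    · have hm' : (s.toList.drop i).take 4 = p.toList := by
        have h2 := congrArg String.toList h
        simp [hK] at h2
        exact h2.symm
      have hpre : p.toList <+: s.toList.drop i := (pv_take4 _ _ hp).mp hm'
      refine ⟨i, ?_⟩
      rw [hP]; simp only [String.toList_append]
      rw [pv_prefix_split, hp]; exact ⟨hpre, hc⟩
  · rintro ⟨j, hj⟩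
    rw [hP] at hj; simp only [String.toList_append] at hj
    rw [pv_prefix_split, hp] at hj
    obtain ⟨hpre, hsuf⟩ := hj
    have htake : (s.toList.drop j).take 4 = p.toList := (pv_take4 _ _ hp).mpr hpre
    refine ⟨j, pv_lt_of_prefix _ _ _ (by intro hc; rw [hc] at hp; simp at hp) hpre, ?_⟩
    rw [pv_mem_keysAt, htake]
    exact ⟨hm, Or.inr (Or.inr (Or.inr (Or.inr (⟨hsuf, by rw [hK]; simp⟩))))⟩

theorem pv_contains_base (s p : String) (hp : p.toList.length = 4) (hm : p.toList ∈ pvModels)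
    (hplus : ¬ ('+' ∈ p.toList)) :
    (pvMatched s.toList).contains p = PySem.Str.isIn p s := by
  rw [Bool.eq_iff_iff, List.contains_iff_mem]
  simp only [PySem.Str.isIn_eq]
  rw [← PySem.Chars.exists_prefix_drop_iff_isIn]
  simp only [pvMatched, List.mem_flatMap, List.mem_range]
  constructor
  · rintro ⟨i, hi, hk⟩
    rw [pv_mem_keysAt] at hk
    obtain ⟨hmem, hor⟩ := hk
    rcases hor with h | ⟨hc, h⟩ | ⟨hc, h⟩ | ⟨hc, h⟩ | ⟨hc, h⟩
    · have h2 := congrArg String.toList h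
      simp at h2
      exact ⟨i, (pv_take4 _ _ hp).mp h2.symm⟩
    · exact absurd ((pv_key_suffix _ _ _ h).subset (show '+' ∈ "+TI".toList by decide)) hplus
    · exact absurd ((pv_key_suffix _ _ _ h).subset (show '+' ∈ "+SUPER".toList by decide)) hplus
    · exact absurd ((pv_key_suffix _ _ _ h).subset (show '+' ∈ "+XTX".toList by decide)) hplus
    · exact absurd ((pv_key_suffix _ _ _ h).subset (show '+' ∈ "+XT".toList by decide)) hplus
  · rintro ⟨j, hj⟩
    have htake : (s.toList.drop j).take 4 = p.toList := (pv_take4 _ _ hp).mpr hj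
    refine ⟨j, pv_lt_of_prefix _ _ _ (by intro hc; rw [hc] at hp; simp at hp) hj, ?_⟩
    rw [pv_mem_keysAt, htake]
    exact ⟨hm, Or.inl (by simp)⟩

theorem pvc_0 (s : String) : (pvMatched s.toList).contains "4090" = PySem.Str.isIn "4090" s :=
  pv_contains_base s "4090" (by decide) (by decide) (by decide)

theorem pvc_1 (s : String) : (pvMatched s.toList).contains "4080" = PySem.Str.isIn "4080" s :=
  pv_contains_base s "4080" (by decide) (by decide) (by decide)

theorem pvc_2 (s : String) : (pvMatched s.toList).contains "4070+TI" = (PySem.Str.isIn "4070 TI" s || PySem.Str.isIn "4070TI" s) :=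
  pv_contains_ti s "4070" "4070+TI" "4070 TI" "4070TI" (by decide) (by decide) (by decide) (by decide) (by decide)

theorem pvc_3 (s : String) : (pvMatched s.toList).contains "4070" = PySem.Str.isIn "4070" s :=
  pv_contains_base s "4070" (by decide) (by decide) (by decide)

theorem pvc_4 (s : String) : (pvMatched s.toList).contains "4060+TI" = (PySem.Str.isIn "4060 TI" s || PySem.Str.isIn "4060TI" s) :=
  pv_contains_ti s "4060" "4060+TI" "4060 TI" "4060TI" (by decide) (by decide) (by decide) (by decide) (by decide)

theorem pvc_5 (s : String) : (pvMatched s.toList).contains "4060" = PySem.Str.isIn "4060" s :=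
  pv_contains_base s "4060" (by decide) (by decide) (by decide)

theorem pvc_6 (s : String) : (pvMatched s.toList).contains "3090+TI" = (PySem.Str.isIn "3090 TI" s || PySem.Str.isIn "3090TI" s) :=
  pv_contains_ti s "3090" "3090+TI" "3090 TI" "3090TI" (by decide) (by decide) (by decide) (by decide) (by decide)

theorem pvc_7 (s : String) : (pvMatched s.toList).contains "3090" = PySem.Str.isIn "3090" s :=
  pv_contains_base s "3090" (by decide) (by decide) (by decide)

theorem pvc_8 (s : String) : (pvMatched s.toList).contains "3080+TI" = (PySem.Str.isIn "3080 TI" s || PySem.Str.isIn "3080TI" s) :=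
  pv_contains_ti s "3080" "3080+TI" "3080 TI" "3080TI" (by decide) (by decide) (by decide) (by decide) (by decide)

theorem pvc_9 (s : String) : (pvMatched s.toList).contains "3080" = PySem.Str.isIn "3080" s :=
  pv_contains_base s "3080" (by decide) (by decide) (by decide)

theorem pvc_10 (s : String) : (pvMatched s.toList).contains "3070+TI" = (PySem.Str.isIn "3070 TI" s || PySem.Str.isIn "3070TI" s) :=
  pv_contains_ti s "3070" "3070+TI" "3070 TI" "3070TI" (by decide) (by decide) (by decide) (by decide) (by decide)

theorem pvc_11 (s : String) : (pvMatched s.toList).contains "3070" = PySem.Str.isIn "3070" s :=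
  pv_contains_base s "3070" (by decide) (by decide) (by decide)

theorem pvc_12 (s : String) : (pvMatched s.toList).contains "3060+TI" = (PySem.Str.isIn "3060 TI" s || PySem.Str.isIn "3060TI" s) :=
  pv_contains_ti s "3060" "3060+TI" "3060 TI" "3060TI" (by decide) (by decide) (by decide) (by decide) (by decide)

theorem pvc_13 (s : String) : (pvMatched s.toList).contains "3060" = PySem.Str.isIn "3060" s :=
  pv_contains_base s "3060" (by decide) (by decide) (by decide)

theorem pvc_14 (s : String) : (pvMatched s.toList).contains "2080+TI" = (PySem.Str.isIn "2080 TI" s || PySem.Str.isIn "2080TI" s) :=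
  pv_contains_ti s "2080" "2080+TI" "2080 TI" "2080TI" (by decide) (by decide) (by decide) (by decide) (by decide)

theorem pvc_15 (s : String) : (pvMatched s.toList).contains "2080+SUPER" = PySem.Str.isIn "2080 SUPER" s :=
  pv_contains_super s "2080" "2080+SUPER" "2080 SUPER" (by decide) (by decide) (by decide) (by decide)

theorem pvc_16 (s : String) : (pvMatched s.toList).contains "2080" = PySem.Str.isIn "2080" s :=
  pv_contains_base s "2080" (by decide) (by decide) (by decide)

theorem pvc_17 (s : String) : (pvMatched s.toList).contains "2070+SUPER" = PySem.Str.isIn "2070 SUPER" s :=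
  pv_contains_super s "2070" "2070+SUPER" "2070 SUPER" (by decide) (by decide) (by decide) (by decide)

theorem pvc_18 (s : String) : (pvMatched s.toList).contains "2070" = PySem.Str.isIn "2070" s :=
  pv_contains_base s "2070" (by decide) (by decide) (by decide)

theorem pvc_19 (s : String) : (pvMatched s.toList).contains "2060+SUPER" = PySem.Str.isIn "2060 SUPER" s :=
  pv_contains_super s "2060" "2060+SUPER" "2060 SUPER" (by decide) (by decide) (by decide) (by decide)

theorem pvc_20 (s : String) : (pvMatched s.toList).contains "2060" = PySem.Str.isIn "2060" s :=
  pv_contains_base s "2060" (by decide) (by decide) (by decide)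

theorem pvc_21 (s : String) : (pvMatched s.toList).contains "1660+TI" = (PySem.Str.isIn "1660 TI" s || PySem.Str.isIn "1660TI" s) :=
  pv_contains_ti s "1660" "1660+TI" "1660 TI" "1660TI" (by decide) (by decide) (by decide) (by decide) (by decide)

theorem pvc_22 (s : String) : (pvMatched s.toList).contains "1660+SUPER" = PySem.Str.isIn "1660 SUPER" s :=
  pv_contains_super s "1660" "1660+SUPER" "1660 SUPER" (by decide) (by decide) (by decide) (by decide)

theorem pvc_23 (s : String) : (pvMatched s.toList).contains "1660" = PySem.Str.isIn "1660" s :=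
  pv_contains_base s "1660" (by decide) (by decide) (by decide)

theorem pvc_24 (s : String) : (pvMatched s.toList).contains "7900+XTX" = PySem.Str.isIn "7900 XTX" s :=
  pv_contains_xtx s "7900" "7900+XTX" "7900 XTX" (by decide) (by decide) (by decide) (by decide)

theorem pvc_25 (s : String) : (pvMatched s.toList).contains "7900+XT" = PySem.Str.isIn "7900 XT" s :=
  pv_contains_xt s "7900" "7900+XT" "7900 XT" (by decide) (by decide) (by decide) (by decide)

theorem pvc_26 (s : String) : (pvMatched s.toList).contains "6950+XT" = PySem.Str.isIn "6950 XT" s :=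
  pv_contains_xt s "6950" "6950+XT" "6950 XT" (by decide) (by decide) (by decide) (by decide)

theorem pvc_27 (s : String) : (pvMatched s.toList).contains "6900+XT" = PySem.Str.isIn "6900 XT" s :=
  pv_contains_xt s "6900" "6900+XT" "6900 XT" (by decide) (by decide) (by decide) (by decide)

theorem pvc_28 (s : String) : (pvMatched s.toList).contains "6800+XT" = PySem.Str.isIn "6800 XT" s :=
  pv_contains_xt s "6800" "6800+XT" "6800 XT" (by decide) (by decide) (by decide) (by decide)

theorem pvc_29 (s : String) : (pvMatched s.toList).contains "6800" = PySem.Str.isIn "6800" s :=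
  pv_contains_base s "6800" (by decide) (by decide) (by decide)

theorem pvc_30 (s : String) : (pvMatched s.toList).contains "6700+XT" = PySem.Str.isIn "6700 XT" s :=
  pv_contains_xt s "6700" "6700+XT" "6700 XT" (by decide) (by decide) (by decide) (by decide)

theorem pvc_31 (s : String) : (pvMatched s.toList).contains "6600+XT" = PySem.Str.isIn "6600 XT" s :=
  pv_contains_xt s "6600" "6600+XT" "6600 XT" (by decide) (by decide) (by decide) (by decide)

theorem pvc_32 (s : String) : (pvMatched s.toList).contains "6600" = PySem.Str.isIn "6600" s :=
  pv_contains_base s "6600" (by decide) (by decide) (by decide)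

-- ===== VERDICT (by name: the statement is the Claim_ definition above) =====
set_option maxHeartbeats 4000000 in
set_option maxRecDepth 4096 in
theorem match_gpu_model_spec : Claim_equal_match_gpu_model := by
  intro gpu_name _
  unfold Spec_match_gpu_model match_gpu_model match_gpu_model_alt pvPriority
  simp only [List.find?]
  simp only [pvc_0, pvc_1, pvc_2, pvc_3, pvc_4, pvc_5, pvc_6, pvc_7, pvc_8, pvc_9, pvc_10, pvc_11, pvc_12, pvc_13, pvc_14, pvc_15, pvc_16, pvc_17, pvc_18, pvc_19, pvc_20, pvc_21, pvc_22, pvc_23, pvc_24, pvc_25, pvc_26, pvc_27, pvc_28, pvc_29, pvc_30, pvc_31, pvc_32]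
  cases h0 : PySem.Str.isIn "4090" (PySem.Str.upper gpu_name) with
  | true => rfl
  | false =>
    cases h1 : PySem.Str.isIn "4080" (PySem.Str.upper gpu_name) with
    | true => rfl
    | false =>
      cases h2 : PySem.Str.isIn "4070 TI" (PySem.Str.upper gpu_name) with
      | true => rfl
      | false =>
        cases h3 : PySem.Str.isIn "4070TI" (PySem.Str.upper gpu_name) with
        | true => rfl
        | false =>
          cases h4 : PySem.Str.isIn "4070" (PySem.Str.upper gpu_name) with
          | true => rfl
          | false =>
            cases h5 : PySem.Str.isIn "4060 TI" (PySem.Str.upper gpu_name) with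
            | true => rfl
            | false =>
              cases h6 : PySem.Str.isIn "4060TI" (PySem.Str.upper gpu_name) with
              | true => rfl
              | false =>
                cases h7 : PySem.Str.isIn "4060" (PySem.Str.upper gpu_name) with
                | true => rfl
                | false =>
                  cases h8 : PySem.Str.isIn "3090 TI" (PySem.Str.upper gpu_name) with
                  | true => rfl
                  | false =>
                    cases h9 : PySem.Str.isIn "3090TI" (PySem.Str.upper gpu_name) with
                    | true => rfl
                    | false =>
                      cases h10 : PySem.Str.isIn "3090" (PySem.Str.upper gpu_name) with
                      | true => rfl
                      | false =>
                        cases h11 : PySem.Str.isIn "3080 TI" (PySem.Str.upper gpu_name) with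
                        | true => rfl
                        | false =>
                          cases h12 : PySem.Str.isIn "3080TI" (PySem.Str.upper gpu_name) with
                          | true => rfl
                          | false =>
                            cases h13 : PySem.Str.isIn "3080" (PySem.Str.upper gpu_name) with
                            | true => rfl
                            | false =>
                              cases h14 : PySem.Str.isIn "3070 TI" (PySem.Str.upper gpu_name) with
                              | true => rfl
                              | false =>
                                cases h15 : PySem.Str.isIn "3070TI" (PySem.Str.upper gpu_name) with
                                | true => rfl
                                | false =>
                                  cases h16 : PySem.Str.isIn "3070" (PySem.Str.upper gpu_name) with
                                  | true => rfl
                                  | false =>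
                                    cases h17 : PySem.Str.isIn "3060 TI" (PySem.Str.upper gpu_name) with
                                    | true => rfl
                                    | false =>
                                      cases h18 : PySem.Str.isIn "3060TI" (PySem.Str.upper gpu_name) with
                                      | true => rfl
                                      | false =>
                                        cases h19 : PySem.Str.isIn "3060" (PySem.Str.upper gpu_name) with
                                        | true => rfl
                                        | false =>
                                          cases h20 : PySem.Str.isIn "2080 TI" (PySem.Str.upper gpu_name) with
                                          | true => rfl
                                          | false =>
                                            cases h21 : PySem.Str.isIn "2080TI" (PySem.Str.upper gpu_name) with
                                            | true => rfl
                                            | false =>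
                                              cases h22 : PySem.Str.isIn "2080 SUPER" (PySem.Str.upper gpu_name) with
                                              | true => rfl
                                              | false =>
                                                cases h23 : PySem.Str.isIn "2080" (PySem.Str.upper gpu_name) with
                                                | true => rfl
                                                | false =>
                                                  cases h24 : PySem.Str.isIn "2070 SUPER" (PySem.Str.upper gpu_name) with
                                                  | true => rfl
                                                  | false =>
                                                    cases h25 : PySem.Str.isIn "2070" (PySem.Str.upper gpu_name) with
                                                    | true => rfl
                                                    | false =>
                                                      cases h26 : PySem.Str.isIn "2060 SUPER" (PySem.Str.upper gpu_name) with
                                                      | true => rfl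
                                                      | false =>
                                                        cases h27 : PySem.Str.isIn "2060" (PySem.Str.upper gpu_name) with
                                                        | true => rfl
                                                        | false =>
                                                          cases h28 : PySem.Str.isIn "1660 TI" (PySem.Str.upper gpu_name) with
                                                          | true => rfl
                                                          | false =>
                                                            cases h29 : PySem.Str.isIn "1660TI" (PySem.Str.upper gpu_name) with
                                                            | true => rfl
                                                            | false =>
                                                              cases h30 : PySem.Str.isIn "1660 SUPER" (PySem.Str.upper gpu_name) with
                                                              | true => rfl
                                                              | false =>
                                                                cases h31 : PySem.Str.isIn "1660" (PySem.Str.upper gpu_name) with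
                                                                | true => rfl
                                                                | false =>
                                                                  cases h32 : PySem.Str.isIn "7900 XTX" (PySem.Str.upper gpu_name) with
                                                                  | true => rfl
                                                                  | false =>
                                                                    cases h33 : PySem.Str.isIn "7900 XT" (PySem.Str.upper gpu_name) with
                                                                    | true => rfl
                                                                    | false =>
                                                                      cases h34 : PySem.Str.isIn "6950 XT" (PySem.Str.upper gpu_name) with
                                                                      | true => rfl
                                                                      | false =>
                                                                        cases h35 : PySem.Str.isIn "6900 XT" (PySem.Str.upper gpu_name) with
                                                                        | true => rfl
                                                                        | false =>
                                                                          cases h36 : PySem.Str.isIn "6800 XT" (PySem.Str.upper gpu_name) with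
                                                                          | true => rfl
                                                                          | false =>
                                                                            cases h37 : PySem.Str.isIn "6800" (PySem.Str.upper gpu_name) with
                                                                            | true => rfl
                                                                            | false =>
                                                                              cases h38 : PySem.Str.isIn "6700 XT" (PySem.Str.upper gpu_name) with
                                                                              | true => rfl
                                                                              | false =>
                                                                                cases h39 : PySem.Str.isIn "6600 XT" (PySem.Str.upper gpu_name) with
                                                                                | true => rfl
                                                                                | false =>
                                                                                  cases h40 : PySem.Str.isIn "6600" (PySem.Str.upper gpu_name) with
                                                                                  | true => rfl
                                                                                  | false =>
                                                                                    rfl
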